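-- pv_equiv track=rewrite | github.com/GraphicDThanh/training-hub | backend/python/python/think-python-2/13-pr2-data-structure/utils.py | split_word_by_escape
-- ===== SOURCE A (Python) =====
-- from string import punctuation, whitespace
--
-- def split_word_by_escape(word):
--     """split word by escape to list word
--
--         word: string
--     Return: list of words
--     """
--     escape_string = punctuation + """“——’’0123456789"""
--     is_not_exist_escape = True
--
--     word = word.lower()
--
--     for char in escape_string:
--         if char in word:
--             is_not_exist_escape = False
--             for word in word.split(char):
--                 return split_word_by_escape(word)
--
--     if is_not_exist_escape:
--         return word
-- ===== SOURCE B (Python) =====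
-- from string import punctuation
--
-- _ESCAPES = frozenset(punctuation + """“——’’0123456789""")
--
--
-- def split_word_by_escape(word):
--     buf = []
--     for ch in word.lower():
--         if ch in _ESCAPES:
--             break
--         buf.append(ch)
--     return "".join(buf)
-- ===== Notes on version B (the rewrite author's own statement) =====
-- stated objective: simpler
-- what changed: Replaces A's recursion over per-escape-char word.split calls (rescanning the word for each of the ~45 escape characters at every recursion level) with a single left-to-right pass over the lowercased word that stops at the first character found in a precomputed escape set.
import Mathlib
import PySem

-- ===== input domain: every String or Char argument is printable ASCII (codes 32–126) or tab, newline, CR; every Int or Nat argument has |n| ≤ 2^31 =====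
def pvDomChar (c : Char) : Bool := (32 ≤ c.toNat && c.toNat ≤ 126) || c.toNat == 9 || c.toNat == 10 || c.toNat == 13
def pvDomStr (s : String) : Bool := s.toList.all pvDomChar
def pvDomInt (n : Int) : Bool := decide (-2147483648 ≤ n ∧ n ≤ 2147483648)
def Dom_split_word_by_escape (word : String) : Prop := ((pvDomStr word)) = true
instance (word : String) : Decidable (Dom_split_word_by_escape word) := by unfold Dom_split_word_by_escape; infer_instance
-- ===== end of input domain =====

-- B replaces A's recursion over per-escape-char splits by a single forward pass over the
-- lowercased word that stops at the first escape character (simpler; one traversal).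


-- ===== PORT A =====
-- escape_string = punctuation + """“——’’0123456789"""
def pvEscapeString : List Char :=
  ("!\"#$%&'()*+,-./:;<=>?@[\\]^_`{|}~" ++ "“——’’0123456789").toList

-- head of a single-char split is the prefix before the first occurrence (needed for termination)
theorem pv_splitOn_go_acc (sep : List Char) (fuel : Nat) (l cur : List Char)
    (acc : List (List Char)) :
    PySem.Chars.splitOn.go sep fuel l cur acc =
      acc.reverse ++ PySem.Chars.splitOn.go sep fuel l cur [] := by
  induction fuel generalizing l cur acc with
  | zero => simp [PySem.Chars.splitOn.go]
  | succ n ih =>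
    cases l with
    | nil => simp [PySem.Chars.splitOn.go]
    | cons h t =>
      simp only [PySem.Chars.splitOn.go]
      split_ifs with hp
      · rw [ih _ _ (cur.reverse :: acc), ih _ _ [cur.reverse]]
        simp
      · exact ih _ _ _

theorem pv_splitOn_go_head (c : Char) (fuel : Nat) (l cur : List Char)
    (hf : l.length ≤ fuel) :
    ∃ t, PySem.Chars.splitOn.go [c] fuel l cur [] =
      (cur.reverse ++ l.takeWhile (fun x => x ≠ c)) :: t := by
  induction fuel generalizing l cur with
  | zero =>
    have : l = [] := List.eq_nil_of_length_eq_zero (Nat.le_zero.mp hf)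
    subst this
    exact ⟨[], by simp [PySem.Chars.splitOn.go]⟩
  | succ n ih =>
    cases l with
    | nil => exact ⟨[], by simp [PySem.Chars.splitOn.go]⟩
    | cons h t =>
      simp only [PySem.Chars.splitOn.go]
      split_ifs with hp
      · have hc : h = c := by
          have := hp
          simp at this
          exact this.symm
        subst hc
        rw [pv_splitOn_go_acc]
        exact ⟨PySem.Chars.splitOn.go [h] n (List.drop 1 (h :: t)) [] [], by simp⟩
      · have hc : h ≠ c := by
          intro he; subst he
          simp at hp
        have := ih t (h :: cur) (by simpa using Nat.le_of_succ_le_succ hf)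
        obtain ⟨tl, htl⟩ := this
        refine ⟨tl, ?_⟩
        rw [htl]
        simp [List.takeWhile_cons, hc]

theorem pv_headD_splitOn (l : List Char) (c : Char) :
    (PySem.Chars.splitOn l [c]).headD [] = l.takeWhile (fun x => x ≠ c) := by
  obtain ⟨t, ht⟩ := pv_splitOn_go_head c (l.length + 1) l [] (Nat.le_succ _)
  simp [PySem.Chars.splitOn, ht]

theorem pv_takeWhile_lt (l : List Char) (c : Char) (hc : c ∈ l) :
    (l.takeWhile (fun x => x ≠ c)).length < l.length := by
  induction l with
  | nil => cases hc
  | cons h t ih =>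
    by_cases he : h = c
    · subst he; simp [List.takeWhile_cons]
    · simp only [List.takeWhile_cons, he]
      have hc' : c ∈ t := by cases hc with
        | head => exact absurd rfl he
        | tail _ h2 => exact h2
      simpa [he] using Nat.succ_lt_succ (ih hc')

def split_word_by_escape_core (w : List Char) : List Char :=
  let lw := PySem.Chars.lower w
  match h : pvEscapeString.find? (fun c => PySem.Chars.isIn [c] lw) with
  | some c => split_word_by_escape_core ((PySem.Chars.splitOn lw [c]).headD [])
  | none => lw
termination_by w.length
decreasing_by
  have hin : PySem.Chars.isIn [c] (PySem.Chars.lower w) = true :=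
    by simpa using List.find?_some h
  have hmem : c ∈ PySem.Chars.lower w := by
    have := (PySem.Chars.isIn_iff_infix _ _).mp hin
    obtain ⟨s, t, hst⟩ := this
    rw [← hst]; simp
  rw [pv_headD_splitOn]
  calc (List.takeWhile (fun x => x ≠ c) (PySem.Chars.lower w)).length
      < (PySem.Chars.lower w).length := pv_takeWhile_lt _ _ hmem
    _ = w.length := by simp [PySem.Chars.lower]

def split_word_by_escape (word : String) : String :=
  String.mk (split_word_by_escape_core word.toList)

-- ===== PORT B =====
def pvEscSet : PySem.Set Char := PySem.Set.ofList pvEscapeString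

def split_word_by_escape_alt_go : List Char → List Char
  | [] => []
  | c :: rest =>
    if PySem.Set.contains pvEscSet c then [] else c :: split_word_by_escape_alt_go rest

def split_word_by_escape_alt (word : String) : String :=
  String.mk (split_word_by_escape_alt_go (PySem.Chars.lower word.toList))

-- ===== PRECONDITION & SPEC =====
def Spec_split_word_by_escape (word : String) (out : String) : Prop := out = split_word_by_escape_alt word
instance (word : String) (out : String) : Decidable (Spec_split_word_by_escape word out) := by unfold Spec_split_word_by_escape; infer_instance

-- ===== CLAIM (what is proved, stated in full; the proofs are below) =====
def Claim_equal_split_word_by_escape : Prop := ∀ (word : String), Dom_split_word_by_escape word → Spec_split_word_by_escape word (split_word_by_escape word)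

-- ===== LEMMAS AND PROOFS =====

theorem pv_toNat_ofNat (n : Nat) (h : n < 55296) : (Char.ofNat n).toNat = n := by
  have hv : n.isValidChar := Or.inl h
  simp [Char.ofNat, hv, Char.toNat, Char.ofNatAux]
theorem pv_lowerChar_idem (c : Char) :
    PySem.Chars.lowerChar (PySem.Chars.lowerChar c) = PySem.Chars.lowerChar c := by
  unfold PySem.Chars.lowerChar PySem.Chars.isupper
  split_ifs with h1 h2
  · exfalso
    simp only [Bool.and_eq_true, decide_eq_true_eq] at h1 h2
    have hc65 : 65 ≤ c.toNat := by
      have h := h1.1; simp [Char.le_def] at h; exact h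
    have hc90 : c.toNat ≤ 90 := by
      have h := h1.2; simp [Char.le_def] at h; exact h
    have hval : (Char.ofNat (c.toNat + 32)).toNat = c.toNat + 32 :=
      pv_toNat_ofNat _ (by omega)
    have hZ2 := h2.2
    simp [Char.le_def, UInt32.le_iff_toNat_le] at hZ2
    have hZ3 : (Char.ofNat (c.toNat + 32)).toNat ≤ 90 := hZ2
    omega
  · rfl
  · rfl

theorem pv_lower_fixed (l : List Char) (h : ∀ x ∈ l, PySem.Chars.lowerChar x = x) :
    PySem.Chars.lower l = l := by
  have := List.map_congr_left h
  simpa [PySem.Chars.lower] using this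

theorem pv_altGo_takeWhile (l : List Char) (c : Char) (hc : c ∈ pvEscapeString) :
    split_word_by_escape_alt_go (l.takeWhile (fun x => x ≠ c)) =
      split_word_by_escape_alt_go l := by
  induction l with
  | nil => rfl
  | cons h t ih =>
    by_cases he : h = c
    · subst he
      have : PySem.Set.contains pvEscSet h = true := by
        unfold pvEscSet
        rw [PySem.Set.contains_iff, PySem.Set.mem_ofList]
        exact hc
      have hsplit : List.takeWhile (fun x => decide (x ≠ h)) (h :: t) = [] := by simp
      rw [hsplit]
      simp only [split_word_by_escape_alt_go]
      rw [if_pos this]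
    · have hsplit : List.takeWhile (fun x => decide (x ≠ c)) (h :: t)
          = h :: List.takeWhile (fun x => decide (x ≠ c)) t := by
        simp [he]
      rw [hsplit]
      simp only [split_word_by_escape_alt_go]
      rw [ih]

theorem pv_altGo_all (l : List Char) (h : ∀ c ∈ pvEscapeString, c ∉ l) :
    split_word_by_escape_alt_go l = l := by
  induction l with
  | nil => rfl
  | cons x t ih =>
    have hx : PySem.Set.contains pvEscSet x = false := by
      by_contra hb
      have : x ∈ pvEscapeString := by
        have := Bool.of_not_eq_false hb
        simpa [pvEscSet, PySem.Set.contains_iff, PySem.Set.mem_ofList] using this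
      exact h x this (List.mem_cons_self)
    simp only [split_word_by_escape_alt_go, hx, Bool.false_eq_true, if_false]
    rw [ih (fun c hc hm => h c hc (List.mem_cons_of_mem _ hm))]

theorem pv_core_eq (n : Nat) : ∀ (w : List Char), w.length ≤ n →
    split_word_by_escape_core w = split_word_by_escape_alt_go (PySem.Chars.lower w) := by
  induction n with
  | zero =>
    intro w hw
    have : w = [] := List.eq_nil_of_length_eq_zero (Nat.le_zero.mp hw)
    subst this
    rw [split_word_by_escape_core]
    rfl
  | succ n ih =>
    intro w hw
    rw [split_word_by_escape_core]
    cases hf : pvEscapeString.find? (fun c => PySem.Chars.isIn [c] (PySem.Chars.lower w)) with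
    | none =>
      simp only []
      symm
      apply pv_altGo_all
      intro c hc hm
      have := List.find?_eq_none.mp hf c hc
      simp only [Bool.not_eq_true] at this
      have : PySem.Chars.isIn [c] (PySem.Chars.lower w) = true := by
        apply (PySem.Chars.isIn_iff_infix _ _).mpr
        obtain ⟨s, t, hst⟩ := List.append_of_mem hm
        exact ⟨s, t, by rw [hst]; simp⟩
      simp_all
    | some c =>
      simp only []
      have hcesc : c ∈ pvEscapeString := List.mem_of_find?_eq_some hf
      have hin : PySem.Chars.isIn [c] (PySem.Chars.lower w) = true := by
        simpa using List.find?_some hf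
      have hmem : c ∈ PySem.Chars.lower w := by
        obtain ⟨s, t, hst⟩ := (PySem.Chars.isIn_iff_infix _ _).mp hin
        rw [← hst]; simp
      rw [pv_headD_splitOn]
      have hlen : (List.takeWhile (fun x => x ≠ c) (PySem.Chars.lower w)).length ≤ n := by
        have h1 := pv_takeWhile_lt (PySem.Chars.lower w) c hmem
        have h2 : (PySem.Chars.lower w).length = w.length := by simp [PySem.Chars.lower]
        omega
      rw [ih _ hlen]
      have hfix : PySem.Chars.lower (List.takeWhile (fun x => x ≠ c) (PySem.Chars.lower w))
          = List.takeWhile (fun x => x ≠ c) (PySem.Chars.lower w) := by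
        apply pv_lower_fixed
        intro x hx
        have hxl : x ∈ PySem.Chars.lower w := (List.takeWhile_sublist _).subset hx
        simp only [PySem.Chars.lower, List.mem_map] at hxl
        obtain ⟨y, _, hy⟩ := hxl
        rw [← hy]
        exact pv_lowerChar_idem y
      rw [hfix]
      exact pv_altGo_takeWhile _ _ hcesc

-- ===== VERDICT (by name: the statement is the Claim_ definition above) =====
theorem split_word_by_escape_spec : Claim_equal_split_word_by_escape := by
  intro word _
  unfold Spec_split_word_by_escape split_word_by_escape split_word_by_escape_alt
  rw [pv_core_eq word.toList.length word.toList (Nat.le_refl _)]
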